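-- pv_equiv track=rewrite | github.com/ZSE-Radom/Motorola-2025 | src/utils.py | can_piece_move
-- ===== SOURCE A (Python) =====
-- def can_piece_move(board, src_row, src_col, dest_row, dest_col):
--     """Check if a piece can move to the destination (approximate)"""
--     piece = board[src_row][src_col].lower()
--
--     # Check if destination has a piece of the same color
--     dest_piece = board[dest_row][dest_col]
--     if dest_piece != " ":
--         if (piece.islower() and dest_piece.islower()) or (piece.isupper() and dest_piece.isupper()):
--             return False
--
--     # Simplified movement patterns
--     if piece == 'p':  # Pawn
--         direction = -1 if piece.islower() else 1  # White pawns move up (-1), black down (+1)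
--
--         if src_col == dest_col:  # Forward move
--             # Check if path is clear
--             if dest_piece != " ":
--                 return False
--
--             # Single square forward
--             if src_row + direction == dest_row:
--                 return True
--
--             # Double square forward from starting position
--             if (src_row == 6 and piece.islower() and dest_row == 4) or \
--                (src_row == 1 and piece.isupper() and dest_row == 3):
--                 middle_row = src_row + direction
--                 if board[middle_row][src_col] == " ":
--                     return True
--             return False
--         elif abs(src_col - dest_col) == 1 and src_row + direction == dest_row:  # Diagonal capture
--             # Must capture a piece (ignoring en passant for simplicity)
--             return dest_piece != " "
--         return False
--     elif piece == 'r':  # Rook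
--         if src_row != dest_row and src_col != dest_col:
--             return False
--
--         # Check if path is clear
--         if src_row == dest_row:  # Horizontal move
--             step = 1 if src_col < dest_col else -1
--             for col in range(src_col + step, dest_col, step):
--                 if board[src_row][col] != " ":
--                     return False
--         else:  # Vertical move
--             step = 1 if src_row < dest_row else -1
--             for row in range(src_row + step, dest_row, step):
--                 if board[row][src_col] != " ":
--                     return False
--         return True
--     elif piece == 'n':  # Knight
--         # Knight can jump over pieces
--         return (abs(src_row - dest_row) == 2 and abs(src_col - dest_col) == 1) or \
--                (abs(src_row - dest_row) == 1 and abs(src_col - dest_col) == 2)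
--     elif piece == 'b':  # Bishop
--         if abs(src_row - dest_row) != abs(src_col - dest_col):
--             return False
--
--         # Check if path is clear
--         row_step = 1 if src_row < dest_row else -1
--         col_step = 1 if src_col < dest_col else -1
--
--         row, col = src_row + row_step, src_col + col_step
--         while row != dest_row and col != dest_col:
--             if board[row][col] != " ":
--                 return False
--             row += row_step
--             col += col_step
--         return True
--     elif piece == 'q':  # Queen
--         # Combination of rook and bishop
--         if src_row == dest_row or src_col == dest_col:  # Rook-like move
--             if src_row == dest_row:  # Horizontal
--                 step = 1 if src_col < dest_col else -1
--                 for col in range(src_col + step, dest_col, step):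
--                     if board[src_row][col] != " ":
--                         return False
--             else:  # Vertical
--                 step = 1 if src_row < dest_row else -1
--                 for row in range(src_row + step, dest_row, step):
--                     if board[row][src_col] != " ":
--                         return False
--             return True
--         elif abs(src_row - dest_row) == abs(src_col - dest_col):  # Bishop-like move
--             row_step = 1 if src_row < dest_row else -1
--             col_step = 1 if src_col < dest_col else -1
--
--             row, col = src_row + row_step, src_col + col_step
--             while row != dest_row and col != dest_col:
--                 if board[row][col] != " ":
--                     return False
--                 row += row_step
--                 col += col_step
--             return True
--         return False
--     elif piece == 'k':  # King
--         # Basic king move (not considering check)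
--         return abs(src_row - dest_row) <= 1 and abs(src_col - dest_col) <= 1
--
--     return False
-- ===== SOURCE B (Python) =====
-- # Generate-and-test move generation: cast rays / enumerate candidate squares from the
-- # source and test whether the destination is among them, instead of classifying the
-- # (src,dest) pair and scanning the between-path.
--
-- _ROOK_DIRS = ((1, 0), (-1, 0), (0, 1), (0, -1))
-- _BISHOP_DIRS = ((1, 1), (1, -1), (-1, 1), (-1, -1))
--
--
-- def _get(board, r, c):
--     """Square at (r, c), or None when it is not a valid (Python) index pair."""
--     if -len(board) <= r < len(board):
--         row = board[r]
--         if -len(row) <= c < len(row):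
--             return row[c]
--     return None
--
--
-- def _ray_hits(board, target, r, c, dr, dc):
--     """Walk from (r, c) by (dr, dc); does the ray reach target before a blocker?"""
--     while True:
--         sq = _get(board, r, c)
--         if sq is None:
--             return False
--         if (r, c) == target:
--             return True
--         if sq != " ":
--             return False
--         r += dr
--         c += dc
--
--
-- def can_piece_move(board, src_row, src_col, dest_row, dest_col):
--     """Check if a piece can move to the destination (approximate)"""
--     piece = board[src_row][src_col].lower()
--     dest_piece = board[dest_row][dest_col]
--
--     if dest_piece != " ":
--         if (piece.islower() and dest_piece.islower()) or (piece.isupper() and dest_piece.isupper()):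
--             return False
--
--     target = (dest_row, dest_col)
--
--     if piece in ('r', 'b', 'q'):
--         dirs = _ROOK_DIRS if piece == 'r' else _BISHOP_DIRS if piece == 'b' else _ROOK_DIRS + _BISHOP_DIRS
--         return any(_ray_hits(board, target, src_row + dr, src_col + dc, dr, dc)
--                    for dr, dc in dirs)
--
--     if piece == 'p':
--         moves = []
--         if _get(board, src_row - 1, src_col) == " ":
--             moves.append((src_row - 1, src_col))
--             if src_row == 6 and _get(board, 4, src_col) == " ":
--                 moves.append((4, src_col))
--         for dc in (-1, 1):
--             sq = _get(board, src_row - 1, src_col + dc)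
--             if sq is not None and sq != " ":
--                 moves.append((src_row - 1, src_col + dc))
--         return target in moves
--
--     if piece == 'n':
--         return target in [(src_row + dr, src_col + dc)
--                           for dr, dc in ((2, 1), (2, -1), (-2, 1), (-2, -1),
--                                          (1, 2), (1, -2), (-1, 2), (-1, -2))]
--
--     if piece == 'k':
--         return target in [(src_row + dr, src_col + dc)
--                           for dr, dc in _ROOK_DIRS + _BISHOP_DIRS]
--
--     return False
-- ===== Notes on version B (the rewrite author's own statement) =====
-- stated objective: alternative
-- what changed: B is a generate-and-test move generator: it casts rays in the piece's direction vectors (stopping at the first blocker or invalid square) and enumerates pawn/knight/king candidate squares, then answers by membership of the destination in the generated moves, instead of A's classify-the-(src,dest)-pair branches with hand-written path-scan loops.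
-- intended difference: On self-moves (src == dest) of an uppercase rook, queen or king ('R'/'Q'/'K'; a lowercase one is stopped by the same-colour check in both programs), A returns True because its alignment tests accept the degenerate move over an empty path, while B returns False because a generated move can never be the source square - a piece cannot move to its own square, so B's value is the intended one. — e.g. on can_piece_move([["K"]], 0, 0, 0, 0): A returns true, B returns false
-- outside the precondition, e.g. on can_piece_move([['B', ' ', ' '], [' ', ' ', ' ']], 0, 0, 0, 0): A raises IndexError, B returns False; on can_piece_move([['B', 'x'], ['y', 'z']], 0, 0, 0, 0): A returns False, B returns False; on can_piece_move([['R'], ['x'], [], [' ']], 0, 0, 3, 0): A returns False, B returns False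
import Mathlib
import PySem

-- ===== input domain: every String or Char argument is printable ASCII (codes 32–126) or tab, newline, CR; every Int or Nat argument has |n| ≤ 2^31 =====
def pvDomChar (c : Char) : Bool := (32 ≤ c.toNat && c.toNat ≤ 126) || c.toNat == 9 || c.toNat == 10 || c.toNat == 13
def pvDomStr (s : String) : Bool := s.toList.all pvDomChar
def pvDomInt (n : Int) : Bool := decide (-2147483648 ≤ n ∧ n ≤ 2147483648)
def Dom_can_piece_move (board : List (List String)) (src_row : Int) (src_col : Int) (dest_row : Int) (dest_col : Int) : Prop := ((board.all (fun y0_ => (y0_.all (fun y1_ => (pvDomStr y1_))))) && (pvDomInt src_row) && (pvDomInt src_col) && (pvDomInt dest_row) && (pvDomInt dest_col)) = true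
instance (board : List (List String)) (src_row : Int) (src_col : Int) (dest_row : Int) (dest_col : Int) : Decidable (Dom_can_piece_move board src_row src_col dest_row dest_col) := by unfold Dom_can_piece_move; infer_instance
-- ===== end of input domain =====

-- B re-implements the move check as generate-and-test move generation: it casts rays /
-- enumerates candidate destination squares from the source and tests membership of the
-- destination, instead of A's classify-the-pair-then-scan-the-path; same cost, a different
-- algorithmic shape. Pre_ excludes inputs where A raises IndexError and the uppercase-bishop
-- self-move corner (A wanders off the board there); D_ states the intended difference on
-- rook/queen/king self-moves, where A returns True and B returns False.


-- shared primitive shims (missing from PySem), used by both ports and by Pre_: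
-- board[r][c] (Python negative-index semantics; the "" default is only reached where
-- Python raises IndexError — such inputs are excluded by Pre_)
def pvCell (board : List (List String)) (r c : Int) : String :=
  ((PySem.List.pyGet? board r).bind (fun row => PySem.List.pyGet? row c)).getD ""
-- board[r][c] is a valid access (no IndexError)
def pvOk (board : List (List String)) (r c : Int) : Bool :=
  ((PySem.List.pyGet? board r).bind (fun row => PySem.List.pyGet? row c)).isSome
-- Python str.islower() / str.isupper(); exact on the ASCII domain (cased = a-z, A-Z)
def pvStrIslower (s : String) : Bool :=
  s.toList.any PySem.Chars.islower && !(s.toList.any PySem.Chars.isupper)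
def pvStrIsupper (s : String) : Bool :=
  s.toList.any PySem.Chars.isupper && !(s.toList.any PySem.Chars.islower)

-- ===== PORT A =====
-- the bishop/queen diagonal 'while row != dest_row and col != dest_col' loop; the fuel
-- |dest_row - src_row| is exactly the number of iterations after which the loop condition
-- becomes false when the Python loop terminates normally; on fuel exhaustion (where the
-- Python loop never returns True — it raises or returns False; excluded by Pre_) we
-- return false
def slideA (board : List (List String)) (destR destC rs cs : Int) : Int → Int → Nat → Bool
  | _, _, 0 => false
  | row, col, fuel+1 =>
      if row ≠ destR ∧ col ≠ destC then
        if pvCell board row col ≠ " " then false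
        else slideA board destR destC rs cs (row + rs) (col + cs) fuel
      else true

def can_piece_move (board : List (List String)) (src_row : Int) (src_col : Int) (dest_row : Int) (dest_col : Int) : Bool :=
  let piece := PySem.Str.lower (pvCell board src_row src_col)
  let dest_piece := pvCell board dest_row dest_col
  if dest_piece ≠ " " ∧ ((pvStrIslower piece ∧ pvStrIslower dest_piece) ∨
                         (pvStrIsupper piece ∧ pvStrIsupper dest_piece)) then false
  else if piece = "p" then
    let direction : Int := if pvStrIslower piece then -1 else 1
    if src_col = dest_col then
      if dest_piece ≠ " " then false
      else if src_row + direction = dest_row then true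
      else if (src_row = 6 ∧ pvStrIslower piece = true ∧ dest_row = 4) ∨
              (src_row = 1 ∧ pvStrIsupper piece = true ∧ dest_row = 3) then
        let middle_row := src_row + direction
        if pvCell board middle_row src_col = " " then true else false
      else false
    else if |src_col - dest_col| = 1 ∧ src_row + direction = dest_row then
      decide (dest_piece ≠ " ")
    else false
  else if piece = "r" then
    if src_row ≠ dest_row ∧ src_col ≠ dest_col then false
    else if src_row = dest_row then
      let step : Int := if src_col < dest_col then 1 else -1
      (PySem.List.pyRange (src_col + step) dest_col step).all
        (fun col => pvCell board src_row col == " ")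
    else
      let step : Int := if src_row < dest_row then 1 else -1
      (PySem.List.pyRange (src_row + step) dest_row step).all
        (fun row => pvCell board row src_col == " ")
  else if piece = "n" then
    decide ((|src_row - dest_row| = 2 ∧ |src_col - dest_col| = 1) ∨
            (|src_row - dest_row| = 1 ∧ |src_col - dest_col| = 2))
  else if piece = "b" then
    if |src_row - dest_row| ≠ |src_col - dest_col| then false
    else
      let row_step : Int := if src_row < dest_row then 1 else -1
      let col_step : Int := if src_col < dest_col then 1 else -1
      slideA board dest_row dest_col row_step col_step
        (src_row + row_step) (src_col + col_step) (dest_row - src_row).natAbs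
  else if piece = "q" then
    if src_row = dest_row ∨ src_col = dest_col then
      if src_row = dest_row then
        let step : Int := if src_col < dest_col then 1 else -1
        (PySem.List.pyRange (src_col + step) dest_col step).all
          (fun col => pvCell board src_row col == " ")
      else
        let step : Int := if src_row < dest_row then 1 else -1
        (PySem.List.pyRange (src_row + step) dest_row step).all
          (fun row => pvCell board row src_col == " ")
    else if |src_row - dest_row| = |src_col - dest_col| then
      let row_step : Int := if src_row < dest_row then 1 else -1
      let col_step : Int := if src_col < dest_col then 1 else -1
      slideA board dest_row dest_col row_step col_step
        (src_row + row_step) (src_col + col_step) (dest_row - src_row).natAbs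
    else false
  else if piece = "k" then
    decide (|src_row - dest_row| ≤ 1 ∧ |src_col - dest_col| ≤ 1)
  else false

-- ===== PORT B =====
-- Source B's _get: the square at (r, c), or none when not a valid (Python) index pair
def pvGetQ (board : List (List String)) (r c : Int) : Option String :=
  (PySem.List.pyGet? board r).bind (fun row => PySem.List.pyGet? row c)
-- fuel for the ray walk (the Python while-loop needs none: each step moves one coordinate
-- monotonically, so it leaves the valid-index window within this many steps)
def pvMaxRow (board : List (List String)) : Nat :=
  board.foldr (fun r m => max r.length m) 0
def pvFuel (board : List (List String)) : Nat :=
  2 * board.length + 2 * pvMaxRow board + 2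
-- Source B's _ray_hits: walk from (r, c) by (dr, dc); does the ray reach target before a blocker?
def rayHits (board : List (List String)) (target : Int × Int) (dr dc : Int) :
    Int → Int → Nat → Bool
  | _, _, 0 => false
  | r, c, fuel+1 =>
      match pvGetQ board r c with
      | none => false
      | some sq =>
          if (r, c) = target then true
          else if sq ≠ " " then false
          else rayHits board target dr dc (r + dr) (c + dc) fuel

def pvRookDirs : List (Int × Int) := [(1, 0), (-1, 0), (0, 1), (0, -1)]
def pvBishopDirs : List (Int × Int) := [(1, 1), (1, -1), (-1, 1), (-1, -1)]

def can_piece_move_alt (board : List (List String)) (src_row : Int) (src_col : Int) (dest_row : Int) (dest_col : Int) : Bool :=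
  let piece := PySem.Str.lower (pvCell board src_row src_col)
  let dest_piece := pvCell board dest_row dest_col
  if dest_piece ≠ " " ∧ ((pvStrIslower piece ∧ pvStrIslower dest_piece) ∨
                         (pvStrIsupper piece ∧ pvStrIsupper dest_piece)) then false
  else
    let target := (dest_row, dest_col)
    if piece = "r" ∨ piece = "b" ∨ piece = "q" then
      let dirs := if piece = "r" then pvRookDirs
                  else if piece = "b" then pvBishopDirs
                  else pvRookDirs ++ pvBishopDirs
      dirs.any (fun d =>
        rayHits board target d.1 d.2 (src_row + d.1) (src_col + d.2) (pvFuel board))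
    else if piece = "p" then
      let moves :=
        (if pvGetQ board (src_row - 1) src_col = some " " then
           (src_row - 1, src_col) ::
             (if src_row = 6 ∧ pvGetQ board 4 src_col = some " " then
                [((4 : Int), src_col)] else [])
         else []) ++
        ([(-1 : Int), 1].foldl (fun ms d =>
           match pvGetQ board (src_row - 1) (src_col + d) with
           | some sq => if sq ≠ " " then ms ++ [(src_row - 1, src_col + d)] else ms
           | none => ms) [])
      moves.contains target
    else if piece = "n" then
      (([(2, 1), (2, -1), (-2, 1), (-2, -1), (1, 2), (1, -2), (-1, 2), (-1, -2)] : List (Int × Int)).map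
        (fun d => (src_row + d.1, src_col + d.2))).contains target
    else if piece = "k" then
      ((pvRookDirs ++ pvBishopDirs).map
        (fun d => (src_row + d.1, src_col + d.2))).contains target
    else false

-- ===== PRECONDITION & SPEC =====
-- (x > 0) - (x < 0), the direction of a coordinate delta
def pvSign (x : Int) : Int := (if 0 < x then 1 else 0) - (if x < 0 then 1 else 0)
-- named pieces of the precondition (Bool-valued so the Decidable instance is immediate):
-- the same-colour early return of both programs does NOT fire
def pvPass (board : List (List String)) (sr sc dR dC : Int) : Bool :=
  !(decide (pvCell board dR dC ≠ " ") &&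
    ((pvStrIslower (PySem.Str.lower (pvCell board sr sc)) && pvStrIslower (pvCell board dR dC)) ||
     (pvStrIsupper (PySem.Str.lower (pvCell board sr sc)) && pvStrIsupper (pvCell board dR dC))))
-- every square strictly between source and destination of an axis-aligned move is on the board
def pvRookPathOk (board : List (List String)) (sr sc dR dC : Int) : Bool :=
  (PySem.List.pyRange 1 (max |dR - sr| |dC - sc|) 1).all
    (fun i => pvOk board (sr + pvSign (dR - sr) * i) (sc + pvSign (dC - sc) * i))
-- every square strictly between source and destination of a diagonal move is on the board
def pvDiagPathOk (board : List (List String)) (sr sc dR dC : Int) : Bool :=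
  (PySem.List.pyRange 1 |dR - sr| 1).all
    (fun i => pvOk board (sr + pvSign (dR - sr) * i) (sc + pvSign (dC - sc) * i))

-- Pre_ excludes (a) inputs where Python A raises IndexError: an invalid source/destination
-- square, an invalid square on a rook/bishop/queen scan path (this also drops a few ragged-
-- board inputs where A stops at a blocker just before the invalid square and returns False —
-- B returns False there too), an invalid pawn double-move middle square; and (b) the
-- uppercase-bishop self-move corner (src = dest, an uncaptured piece lowering to "b"), where
-- A's anti-diagonal while-loop walks off the board by negative-index wraparound and raises
-- IndexError or returns an accidental False.
def Pre_can_piece_move (board : List (List String)) (src_row : Int) (src_col : Int) (dest_row : Int) (dest_col : Int) : Prop :=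
  pvOk board src_row src_col = true ∧ pvOk board dest_row dest_col = true ∧
  ¬ (src_row = dest_row ∧ src_col = dest_col ∧
     PySem.Str.lower (pvCell board src_row src_col) = "b" ∧
     pvPass board src_row src_col dest_row dest_col = true) ∧
  ((PySem.Str.lower (pvCell board src_row src_col) = "p" ∧ dest_col - src_col = 0 ∧
    pvCell board dest_row dest_col = " " ∧ dest_row - src_row ≠ -1 ∧
    src_row = 6 ∧ dest_row = 4) → pvOk board 5 src_col = true) ∧
  (pvPass board src_row src_col dest_row dest_col = true →
    (((PySem.Str.lower (pvCell board src_row src_col) = "r" ∨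
       PySem.Str.lower (pvCell board src_row src_col) = "q") →
      (dest_row - src_row = 0 ∨ dest_col - src_col = 0) →
        pvRookPathOk board src_row src_col dest_row dest_col = true) ∧
     ((PySem.Str.lower (pvCell board src_row src_col) = "b" ∨
       PySem.Str.lower (pvCell board src_row src_col) = "q") →
      (dest_row - src_row ≠ 0 ∧ dest_col - src_col ≠ 0 ∧
       |dest_row - src_row| = |dest_col - src_col|) →
        pvDiagPathOk board src_row src_col dest_row dest_col = true)))

instance (board : List (List String)) (src_row : Int) (src_col : Int) (dest_row : Int) (dest_col : Int) : Decidable (Pre_can_piece_move board src_row src_col dest_row dest_col) := by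
  unfold Pre_can_piece_move; infer_instance

def pvWitness_can_piece_move : List (List String) × Int × Int × Int × Int :=
  ([[" ", " "], ["R", " "]], 1, 0, 0, 0)

-- On self-moves (src = dest) of an uppercase rook, queen or king ("R"/"Q"/"K"; a lowercase
-- one is stopped by the same-colour check in both programs), A returns True (its alignment
-- tests accept the degenerate move over an empty path) while B returns False, because a
-- generated move can never be the source square — a piece cannot move to its own square,
-- so B's value is the intended one.
def D_can_piece_move (board : List (List String)) (src_row : Int) (src_col : Int) (dest_row : Int) (dest_col : Int) : Prop :=
  src_row = dest_row ∧ src_col = dest_col ∧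
  0 ≤ src_row + (board.length : Int) ∧
  0 ≤ src_col + ((board.getD (if src_row < 0 then src_row + (board.length : Int) else src_row).toNat []).length : Int) ∧
  (board.getD (if src_row < 0 then src_row + (board.length : Int) else src_row).toNat []).getD
    (if src_col < 0 then
       src_col + ((board.getD (if src_row < 0 then src_row + (board.length : Int) else src_row).toNat []).length : Int)
     else src_col).toNat "" ∈ (["R", "Q", "K"] : List String)

instance (board : List (List String)) (src_row : Int) (src_col : Int) (dest_row : Int) (dest_col : Int) : Decidable (D_can_piece_move board src_row src_col dest_row dest_col) := by
  unfold D_can_piece_move; infer_instance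

def Spec_can_piece_move (board : List (List String)) (src_row : Int) (src_col : Int) (dest_row : Int) (dest_col : Int) (out : Bool) : Prop := ¬ D_can_piece_move board src_row src_col dest_row dest_col → out = can_piece_move_alt board src_row src_col dest_row dest_col
instance (board : List (List String)) (src_row : Int) (src_col : Int) (dest_row : Int) (dest_col : Int) (out : Bool) : Decidable (Spec_can_piece_move board src_row src_col dest_row dest_col out) := by unfold Spec_can_piece_move; infer_instance

def pvDiffWitness_can_piece_move : List (List String) × Int × Int × Int × Int :=
  ([["K"]], 0, 0, 0, 0)
def pvDiffWitnessOut_can_piece_move : Bool × Bool := (true, false)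

-- ===== CLAIM (what is proved, stated in full; the proofs are below) =====
def Claim_unchanged_can_piece_move : Prop := ∀ (board : List (List String)) (src_row : Int) (src_col : Int) (dest_row : Int) (dest_col : Int), Dom_can_piece_move board src_row src_col dest_row dest_col → Pre_can_piece_move board src_row src_col dest_row dest_col → Spec_can_piece_move board src_row src_col dest_row dest_col (can_piece_move board src_row src_col dest_row dest_col)
def Claim_changed_can_piece_move : Prop := Dom_can_piece_move (pvDiffWitness_can_piece_move.1) (pvDiffWitness_can_piece_move.2.1) (pvDiffWitness_can_piece_move.2.2.1) (pvDiffWitness_can_piece_move.2.2.2.1) (pvDiffWitness_can_piece_move.2.2.2.2) ∧ Pre_can_piece_move (pvDiffWitness_can_piece_move.1) (pvDiffWitness_can_piece_move.2.1) (pvDiffWitness_can_piece_move.2.2.1) (pvDiffWitness_can_piece_move.2.2.2.1) (pvDiffWitness_can_piece_move.2.2.2.2) ∧ D_can_piece_move (pvDiffWitness_can_piece_move.1) (pvDiffWitness_can_piece_move.2.1) (pvDiffWitness_can_piece_move.2.2.1) (pvDiffWitness_can_piece_move.2.2.2.1) (pvDiffWitness_can_piece_move.2.2.2.2) ∧ can_piece_move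 (pvDiffWitness_can_piece_move.1) (pvDiffWitness_can_piece_move.2.1) (pvDiffWitness_can_piece_move.2.2.1) (pvDiffWitness_can_piece_move.2.2.2.1) (pvDiffWitness_can_piece_move.2.2.2.2) = pvDiffWitnessOut_can_piece_move.1 ∧ can_piece_move_alt (pvDiffWitness_can_piece_move.1) (pvDiffWitness_can_piece_move.2.1) (pvDiffWitness_can_piece_move.2.2.1) (pvDiffWitness_can_piece_move.2.2.2.1) (pvDiffWitness_can_piece_move.2.2.2.2) = pvDiffWitnessOut_can_piece_move.2 ∧ pvDiffWitnessOut_can_piece_move.1 ≠ pvDiffWitnessOut_can_piece_move.2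
def Claim_exact_can_piece_move : Prop := ∀ (board : List (List String)) (src_row : Int) (src_col : Int) (dest_row : Int) (dest_col : Int), Dom_can_piece_move board src_row src_col dest_row dest_col → Pre_can_piece_move board src_row src_col dest_row dest_col → D_can_piece_move board src_row src_col dest_row dest_col → can_piece_move board src_row src_col dest_row dest_col ≠ can_piece_move_alt board src_row src_col dest_row dest_col

-- ===== LEMMAS AND PROOFS =====

theorem pvSign_pos {x : Int} (h : 0 < x) : pvSign x = 1 := by
  simp only [pvSign, if_pos h, if_neg (by omega : ¬ x < 0)]; ring

theorem pvSign_neg {x : Int} (h : x < 0) : pvSign x = -1 := by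
  simp only [pvSign, if_neg (by omega : ¬ 0 < x), if_pos h]; ring

theorem pvSign_zero : pvSign 0 = 0 := rfl

-- A's 'step = 1 if a < b else -1' scan from a+step to b equals a centred index scan
theorem range_shift (a b : Int) (p : Int → Bool) :
    (PySem.List.pyRange (a + (if a < b then 1 else -1)) b (if a < b then 1 else -1)).all p
      = (PySem.List.pyRange 1 |b - a| 1).all (fun i => p (a + pvSign (b - a) * i)) := by
  rcases lt_trichotomy a b with h | h | h
  · rw [if_pos h, abs_of_pos (by omega : (0:Int) < b - a), pvSign_pos (by omega : (0:Int) < b - a)]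
    rw [Bool.eq_iff_iff, List.all_eq_true, List.all_eq_true]
    constructor
    · intro hall i hi
      rw [PySem.List.mem_pyRange_one] at hi
      have := hall (a + 1 * i) (by rw [PySem.List.mem_pyRange_one]; omega)
      simpa using this
    · intro hall x hx
      rw [PySem.List.mem_pyRange_one] at hx
      have := hall (x - a) (by rw [PySem.List.mem_pyRange_one]; omega)
      simp only at this
      rwa [show a + 1 * (x - a) = x by ring] at this
  · subst h
    rw [if_neg (lt_irrefl a)]
    rw [PySem.List.pyRange_neg_one_eq_nil (by omega), sub_self, abs_zero,
        PySem.List.pyRange_one_eq_nil (by omega)]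
    rfl
  · rw [if_neg (not_lt.mpr (le_of_lt h)), abs_of_neg (by omega : b - a < 0),
        pvSign_neg (by omega : b - a < 0)]
    rw [Bool.eq_iff_iff, List.all_eq_true, List.all_eq_true]
    constructor
    · intro hall i hi
      rw [PySem.List.mem_pyRange_one] at hi
      have := hall (a + -1 * i) (by rw [PySem.List.mem_pyRange_neg_one]; omega)
      simpa using this
    · intro hall x hx
      rw [PySem.List.mem_pyRange_neg_one] at hx
      have := hall (a - x) (by rw [PySem.List.mem_pyRange_one]; omega)
      simp only at this
      rwa [show a + -1 * (a - x) = x by ring] at this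

-- the diagonal while-loop of A, parametrised by how many steps have been taken
theorem slideA_loop (board : List (List String)) (sr sc rs cs : Int)
    (hrs : rs = 1 ∨ rs = -1) (hcs : cs = 1 ∨ cs = -1) (N : Nat) :
    ∀ (n : Nat) (j : Nat), j + n = N + 1 → 1 ≤ j → j ≤ N →
      slideA board (sr + rs * N) (sc + cs * N) rs cs (sr + rs * j) (sc + cs * j) n
        = (PySem.List.pyRange (j : Int) (N : Int) 1).all
            (fun i => pvCell board (sr + rs * i) (sc + cs * i) == " ") := by
  intro n
  induction n with
  | zero =>
    intro j hj hj1 hj2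
    exfalso; omega
  | succ m ih =>
    intro j hj hj1 hj2
    by_cases hjN : j = N
    · subst hjN
      rw [slideA, if_neg (by intro hcon; exact hcon.1 rfl)]
      rw [PySem.List.pyRange_one_eq_nil (le_refl _), List.all_nil]
    · have hjN' : (j : Int) < (N : Int) := by exact_mod_cast (by omega : j < N)
      have hcond : sr + rs * (j : Int) ≠ sr + rs * (N : Int) ∧
          sc + cs * (j : Int) ≠ sc + cs * (N : Int) := by
        constructor
        · rcases hrs with h | h <;> subst h <;> intro hcontra <;> omega
        · rcases hcs with h | h <;> subst h <;> intro hcontra <;> omega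
      rw [slideA, if_pos hcond]
      rw [PySem.List.pyRange_one_cons hjN', List.all_cons]
      by_cases hcell : pvCell board (sr + rs * (j : Int)) (sc + cs * (j : Int)) = " "
      · rw [if_neg (by simpa using hcell)]
        have hrec := ih (j + 1) (by omega) (by omega) (by omega)
        rw [show sr + rs * (j : Int) + rs = sr + rs * (((j + 1 : Nat)) : Int) by push_cast; ring,
            show sc + cs * (j : Int) + cs = sc + cs * (((j + 1 : Nat)) : Int) by push_cast; ring]
        rw [hrec]
        push_cast
        simp [hcell]
      · rw [if_pos (by simpa using hcell)]
        simp [hcell]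

-- A's bishop/queen diagonal loop as a centred index scan: core form with explicit unit steps
theorem slideA_eq_clear_core (board : List (List String)) (sr sc rs cs : Int) (N : Nat)
    (hrs : rs = 1 ∨ rs = -1) (hcs : cs = 1 ∨ cs = -1) (hN1 : 1 ≤ N) :
    slideA board (sr + rs * N) (sc + cs * N) rs cs (sr + rs) (sc + cs) N
      = (PySem.List.pyRange 1 (N : Int) 1).all
          (fun i => pvCell board (sr + rs * i) (sc + cs * i) == " ") := by
  have h := slideA_loop board sr sc rs cs hrs hcs N N 1 (by omega) (le_refl 1) hN1
  rw [show sr + rs = sr + rs * (((1 : Nat)) : Int) by push_cast; ring,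
      show sc + cs = sc + cs * (((1 : Nat)) : Int) by push_cast; ring, h]
  norm_num

-- A's bishop/queen diagonal loop as a centred index scan, on genuine diagonals
theorem slideA_eq_clear (board : List (List String)) (sr sc dR dC : Int)
    (habs : |sr - dR| = |sc - dC|) (hdr : sr ≠ dR) :
    slideA board dR dC (if sr < dR then 1 else -1) (if sc < dC then 1 else -1)
        (sr + (if sr < dR then 1 else -1)) (sc + (if sc < dC then 1 else -1))
        (dR - sr).natAbs
      = (PySem.List.pyRange 1 |dR - sr| 1).all
          (fun i => pvCell board (sr + pvSign (dR - sr) * i) (sc + pvSign (dC - sc) * i) == " ") := by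
  have habsN : (sr - dR).natAbs = (sc - dC).natAbs := by
    have h1 := habs
    rw [Int.abs_eq_natAbs, Int.abs_eq_natAbs] at h1
    exact_mod_cast h1
  have hdc : sc ≠ dC := by intro h; subst h; omega
  have hN1 : 1 ≤ (dR - sr).natAbs := by omega
  rcases lt_or_gt_of_ne hdr with h1 | h1 <;> rcases lt_or_gt_of_ne hdc with h2 | h2
  · rw [if_pos h1, if_pos h2, pvSign_pos (by omega : (0:Int) < dR - sr),
        pvSign_pos (by omega : (0:Int) < dC - sc), abs_of_pos (by omega : (0:Int) < dR - sr)]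
    have hcore := slideA_eq_clear_core board sr sc 1 1 (dR - sr).natAbs
      (Or.inl rfl) (Or.inl rfl) hN1
    rw [show sr + 1 * (((dR - sr).natAbs : Nat) : Int) = dR by omega,
        show sc + 1 * (((dR - sr).natAbs : Nat) : Int) = dC by omega,
        show (((dR - sr).natAbs : Nat) : Int) = dR - sr by omega] at hcore
    exact hcore
  · rw [if_pos h1, if_neg (by omega : ¬ sc < dC), pvSign_pos (by omega : (0:Int) < dR - sr),
        pvSign_neg (by omega : dC - sc < 0), abs_of_pos (by omega : (0:Int) < dR - sr)]
    have hcore := slideA_eq_clear_core board sr sc 1 (-1) (dR - sr).natAbs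
      (Or.inl rfl) (Or.inr rfl) hN1
    rw [show sr + 1 * (((dR - sr).natAbs : Nat) : Int) = dR by omega,
        show sc + (-1) * (((dR - sr).natAbs : Nat) : Int) = dC by omega,
        show (((dR - sr).natAbs : Nat) : Int) = dR - sr by omega] at hcore
    exact hcore
  · rw [if_neg (by omega : ¬ sr < dR), if_pos h2, pvSign_neg (by omega : dR - sr < 0),
        pvSign_pos (by omega : (0:Int) < dC - sc), abs_of_neg (by omega : dR - sr < 0)]
    have hcore := slideA_eq_clear_core board sr sc (-1) 1 (dR - sr).natAbs
      (Or.inr rfl) (Or.inl rfl) hN1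
    rw [show sr + (-1) * (((dR - sr).natAbs : Nat) : Int) = dR by omega,
        show sc + 1 * (((dR - sr).natAbs : Nat) : Int) = dC by omega,
        show (((dR - sr).natAbs : Nat) : Int) = -(dR - sr) by omega] at hcore
    exact hcore
  · rw [if_neg (by omega : ¬ sr < dR), if_neg (by omega : ¬ sc < dC),
        pvSign_neg (by omega : dR - sr < 0), pvSign_neg (by omega : dC - sc < 0),
        abs_of_neg (by omega : dR - sr < 0)]
    have hcore := slideA_eq_clear_core board sr sc (-1) (-1) (dR - sr).natAbs
      (Or.inr rfl) (Or.inr rfl) hN1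
    rw [show sr + (-1) * (((dR - sr).natAbs : Nat) : Int) = dR by omega,
        show sc + (-1) * (((dR - sr).natAbs : Nat) : Int) = dC by omega,
        show (((dR - sr).natAbs : Nat) : Int) = -(dR - sr) by omega] at hcore
    exact hcore

-- pvPass spells out the early same-colour return condition
theorem pvPass_iff (board : List (List String)) (sr sc dR dC : Int) :
    pvPass board sr sc dR dC = true ↔
      ¬ (pvCell board dR dC ≠ " " ∧
         ((pvStrIslower (PySem.Str.lower (pvCell board sr sc)) ∧
           pvStrIslower (pvCell board dR dC)) ∨
          (pvStrIsupper (PySem.Str.lower (pvCell board sr sc)) ∧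
           pvStrIsupper (pvCell board dR dC)))) := by
  unfold pvPass
  rw [show ∀ b : Bool, ((!b) = true ↔ ¬ (b = true)) from by decide]
  simp only [Bool.and_eq_true, Bool.or_eq_true, decide_eq_true_eq]

-- a valid access yields exactly the pvCell value
theorem pvGetQ_eq_some (board : List (List String)) (r c : Int)
    (h : pvOk board r c = true) : pvGetQ board r c = some (pvCell board r c) := by
  unfold pvOk at h
  unfold pvGetQ pvCell
  rcases hq : (PySem.List.pyGet? board r).bind (fun row => PySem.List.pyGet? row c) with _ | v
  · rw [hq] at h; simp at h
  · rfl


-- bounds extracted from a valid access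
theorem length_le_pvMaxRow (board : List (List String)) (l : List String)
    (h : l ∈ board) : l.length ≤ pvMaxRow board := by
  induction board with
  | nil => simp at h
  | cons x xs ih =>
    unfold pvMaxRow
    rcases List.mem_cons.mp h with h | h
    · subst h; simp [List.foldr]
    · have := ih h
      unfold pvMaxRow at this
      simp only [List.foldr]
      omega

theorem pvOk_bounds (board : List (List String)) (r c : Int)
    (h : pvOk board r c = true) :
    (-(board.length : Int) ≤ r ∧ r < board.length) ∧
    ∃ row, PySem.List.pyGet? board r = some row ∧
      -(row.length : Int) ≤ c ∧ c < row.length ∧ row.length ≤ pvMaxRow board := by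
  unfold pvOk at h
  rcases hrow : PySem.List.pyGet? board r with _ | row
  · rw [hrow] at h; simp at h
  · rw [hrow] at h
    simp only [Option.bind_some] at h
    rcases hc : PySem.List.pyGet? row c with _ | v
    · rw [hc] at h; simp at h
    · have hrIn : PySem.Raise.InRange board.length r := by
        by_contra hcon
        rw [(PySem.List.pyGet?_eq_none_iff board r).mpr hcon] at hrow
        simp at hrow
      have hcIn : PySem.Raise.InRange row.length c := by
        by_contra hcon
        rw [(PySem.List.pyGet?_eq_none_iff row c).mpr hcon] at hc
        simp at hc
      rcases hrIn with ⟨h1, h2⟩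
      rcases hcIn with ⟨h3, h4⟩
      exact ⟨⟨by omega, by omega⟩, row, rfl,
        by omega, by omega, length_le_pvMaxRow board row (PySem.List.mem_of_pyGet?_eq_some _ hrow)⟩

theorem pyGet_norm {α : Type} (xs : List α) (i : Int) :
    PySem.List.pyGet? xs i =
      if 0 ≤ (if i < 0 then i + (xs.length : Int) else i) then
        xs[(if i < 0 then i + (xs.length : Int) else i).toNat]?
      else none := by
  by_cases h0 : 0 ≤ i
  · rw [if_neg (by omega : ¬ i < 0), if_pos h0]
    exact PySem.List.pyGet?_of_nonneg xs h0
  · rw [if_pos (by omega : i < 0)]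
    by_cases h1 : 0 ≤ i + (xs.length : Int)
    · rw [if_pos h1]
      have hk := PySem.List.pyGet?_neg_natCast (xs := xs) (k := (-i).toNat)
        (by omega) (by omega)
      rw [show i = -(((-i).toNat : Nat) : Int) by omega, hk]
      congr 1
      omega
    · rw [if_neg h1, PySem.List.pyGet?_eq_none_iff]
      intro hIn
      unfold PySem.Raise.InRange at hIn
      omega

theorem pvGetQ_iff_D (board : List (List String)) (r c : Int) (v : String) (hv : v ≠ "") :
    pvGetQ board r c = some v ↔
      (0 ≤ r + (board.length : Int) ∧
       0 ≤ c + ((board.getD (if r < 0 then r + (board.length : Int) else r).toNat []).length : Int) ∧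
       (board.getD (if r < 0 then r + (board.length : Int) else r).toNat []).getD
         (if c < 0 then
            c + ((board.getD (if r < 0 then r + (board.length : Int) else r).toNat []).length : Int)
          else c).toNat "" = v) := by
  unfold pvGetQ
  rw [pyGet_norm board r]
  by_cases h0 : 0 ≤ (if r < 0 then r + (board.length : Int) else r)
  · rw [if_pos h0]
    rcases hrow : board[(if r < 0 then r + (board.length : Int) else r).toNat]? with _ | row
    · have hD : board.getD (if r < 0 then r + (board.length : Int) else r).toNat [] = [] := by
        rw [List.getD_eq_getElem?_getD, hrow]; rfl
      rw [hD]
      constructor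
      · intro h; exact absurd h (by simp)
      · rintro ⟨-, -, h⟩
        exact absurd (by simpa using h.symm) hv
    · have hD : board.getD (if r < 0 then r + (board.length : Int) else r).toNat [] = row := by
        rw [List.getD_eq_getElem?_getD, hrow]; rfl
      rw [hD]
      simp only [Option.bind_some]
      rw [pyGet_norm row c]
      by_cases hc0 : 0 ≤ (if c < 0 then c + (row.length : Int) else c)
      · rw [if_pos hc0]
        rcases hcell : row[(if c < 0 then c + (row.length : Int) else c).toNat]? with _ | w
        · have hD2 : row.getD (if c < 0 then c + (row.length : Int) else c).toNat "" = "" := by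
            rw [List.getD_eq_getElem?_getD, hcell]; rfl
          rw [hD2]
          constructor
          · intro h; exact absurd h (by simp)
          · rintro ⟨-, -, h⟩; exact absurd h.symm hv
        · have hD2 : row.getD (if c < 0 then c + (row.length : Int) else c).toNat "" = w := by
            rw [List.getD_eq_getElem?_getD, hcell]; rfl
          rw [hD2]
          constructor
          · intro h
            refine ⟨by omega, by omega, Option.some.inj h⟩
          · rintro ⟨-, -, h⟩; rw [h]
      · rw [if_neg hc0]
        constructor
        · intro h; exact absurd h (by simp)
        · rintro ⟨-, hcc, -⟩
          exact (hc0 (by split_ifs <;> omega)).elim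
  · rw [if_neg h0]
    constructor
    · intro h; exact absurd h (by simp)
    · rintro ⟨hra, -, -⟩
      exact (h0 (by split_ifs <;> omega)).elim

-- a character whose Python lower() is the lowercase letter l is l itself or its uppercase L
theorem pv_lowerChar_shift (c L l : Char) (hn : L.toNat + 32 = l.toNat)
    (hL1 : 65 ≤ L.toNat) (hL2 : L.toNat ≤ 90)
    (h : PySem.Chars.lowerChar c = l) : c = l ∨ c = L := by
  unfold PySem.Chars.lowerChar at h
  split_ifs at h with hif
  · right
    unfold PySem.Chars.isupper at hif
    rw [Bool.and_eq_true, decide_eq_true_iff, decide_eq_true_iff] at hif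
    obtain ⟨h1, h2⟩ := hif
    rw [Char.le_def] at h1 h2
    have hA : ('A' : Char).toNat = 65 := rfl
    have hZ : ('Z' : Char).toNat = 90 := rfl
    have h1' : 65 ≤ c.toNat := h1
    have h2' : c.toNat ≤ 90 := h2
    have hofn : (Char.ofNat (c.toNat + 32)).toNat = c.toNat + 32 := by
      unfold Char.ofNat
      split
      · rfl
      · rename_i hv
        exact absurd (Or.inl (by omega)) hv
    have hcn : (Char.ofNat (c.toNat + 32)).toNat = l.toNat := by rw [h]
    apply Char.ext; apply UInt32.ext
    have e : c.toNat = L.toNat := by omega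
    exact e
  · left; exact h

-- a string whose lower() is "l" but which is not itself lowercase must be "L"
theorem pv_self_upper (board : List (List String)) (sr sc dR dC : Int) (l L : Char)
    (hcases : ∀ c : Char, PySem.Chars.lowerChar c = l → c = l ∨ c = L)
    (hll : PySem.Chars.islower l = true) (hlu : PySem.Chars.isupper l = false)
    (e1 : sr = dR) (e2 : sc = dC)
    (hpass : pvPass board sr sc dR dC = true)
    (hlow : (PySem.Str.lower (pvCell board sr sc)).toList = [l]) :
    (pvCell board sr sc).toList = [L] := by
  have hC := (pvPass_iff board sr sc dR dC).mp hpass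
  rw [← e1, ← e2] at hC
  have hne : pvCell board sr sc ≠ " " := by
    intro hsp
    rw [hsp] at hlow
    have hl' : (' ' : Char) = l := by
      have h' : ([' '] : List Char) = [l] := hlow
      injection h'
    rw [← hl'] at hll
    exact absurd hll (by decide)
  have hli : pvStrIslower (PySem.Str.lower (pvCell board sr sc)) = true := by
    unfold pvStrIslower
    rw [hlow]
    simp [hll, hlu]
  have hup : pvStrIslower (pvCell board sr sc) = false := by
    by_contra hcon
    rw [Bool.not_eq_false] at hcon
    exact hC ⟨hne, Or.inl ⟨hli, hcon⟩⟩
  rw [PySem.Str.toList_lower] at hlow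
  unfold PySem.Chars.lower at hlow
  rcases hs : (pvCell board sr sc).toList with _ | ⟨c, cs⟩
  · rw [hs] at hlow; simp at hlow
  · rw [hs] at hlow
    simp only [List.map_cons, List.cons.injEq] at hlow
    obtain ⟨hc, hcs⟩ := hlow
    have hnil : cs = [] := by simpa using hcs
    subst hnil
    rcases hcases c hc with rfl | rfl
    · exfalso
      unfold pvStrIslower at hup
      rw [hs] at hup
      simp [hll, hlu] at hup
    · rfl

-- a ray that provably never meets the target returns false
theorem rayHits_miss (board : List (List String)) (target : Int × Int) (a b r0 c0 : Int)
    (h : ∀ i : Int, 0 ≤ i → (r0 + a * i, c0 + b * i) ≠ target) :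
    ∀ (fuel : Nat), rayHits board target a b r0 c0 fuel = false := by
  suffices hs : ∀ (fuel : Nat) (r c : Int),
      (∃ i : Int, 0 ≤ i ∧ r = r0 + a * i ∧ c = c0 + b * i) →
      rayHits board target a b r c fuel = false by
    intro fuel
    exact hs fuel r0 c0 ⟨0, le_refl 0, by ring, by ring⟩
  intro fuel
  induction fuel with
  | zero => intro r c _; rfl
  | succ m ih =>
    intro r c hP
    obtain ⟨i, hi0, hr, hc⟩ := hP
    rw [rayHits]
    rcases hq : pvGetQ board r c with _ | sq
    · rfl
    · dsimp only
      rw [if_neg (by rw [hr, hc]; exact h i hi0)]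
      by_cases hsq : sq = " "
      · rw [if_neg (by simpa using hsq)]
        exact ih (r + a) (c + b) ⟨i + 1, by omega, by rw [hr]; ring, by rw [hc]; ring⟩
      · rw [if_pos (by simpa using hsq)]

-- the ray along a clear, valid, aligned path: reaches the destination iff the strictly-
-- between squares are all empty
theorem rayHits_reach (board : List (List String)) (s t sr sc N : Int)
    (hst : s = 1 ∨ s = -1 ∨ t = 1 ∨ t = -1)
    (hpath : ∀ i : Int, 1 ≤ i → i < N → pvOk board (sr + s * i) (sc + t * i) = true)
    (hdest : pvOk board (sr + s * N) (sc + t * N) = true) :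
    ∀ (fuel : Nat) (j : Int), 1 ≤ j → j ≤ N → N - j < (fuel : Int) →
      rayHits board (sr + s * N, sc + t * N) s t (sr + s * j) (sc + t * j) fuel
        = (PySem.List.pyRange j N 1).all
            (fun i => pvCell board (sr + s * i) (sc + t * i) == " ") := by
  intro fuel
  induction fuel with
  | zero => intro j h1 h2 h3; exfalso; omega
  | succ m ih =>
    intro j h1 h2 h3
    rw [rayHits]
    by_cases hjN : j = N
    · subst hjN
      rw [pvGetQ_eq_some board _ _ hdest]
      try dsimp only
      rw [if_pos rfl, PySem.List.pyRange_one_eq_nil (le_refl _), List.all_nil]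
    · have hlt : j < N := by omega
      rw [pvGetQ_eq_some board _ _ (hpath j h1 hlt)]
      have hne : ((sr + s * j, sc + t * j) : Int × Int) ≠ (sr + s * N, sc + t * N) := by
        intro hcon
        rw [Prod.mk.injEq] at hcon
        rcases hst with h | h | h | h <;> subst h <;> omega
      try dsimp only
      rw [if_neg hne, PySem.List.pyRange_one_cons hlt, List.all_cons]
      by_cases hcell : pvCell board (sr + s * j) (sc + t * j) = " "
      · rw [if_neg (by simpa using hcell)]
        rw [show sr + s * j + s = sr + s * (j + 1) by ring,
            show sc + t * j + t = sc + t * (j + 1) by ring]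
        rw [ih (j + 1) (by omega) (by omega) (by omega)]
        simp [hcell]
      · rw [if_pos (by simpa using hcell)]
        simp [hcell]


-- rayHits_reach anchored at the first step after the source
theorem rayHits_reach' (board : List (List String)) (s t sr sc dR dC N : Int) (fuel : Nat)
    (hst : s = 1 ∨ s = -1 ∨ t = 1 ∨ t = -1) (hN1 : 1 ≤ N)
    (hR : dR = sr + s * N) (hC : dC = sc + t * N)
    (hpath : ∀ i : Int, 1 ≤ i → i < N → pvOk board (sr + s * i) (sc + t * i) = true)
    (hdest : pvOk board dR dC = true)
    (hfuel : N - 1 < (fuel : Int)) :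
    rayHits board (dR, dC) s t (sr + s) (sc + t) fuel
      = (PySem.List.pyRange 1 N 1).all
          (fun i => pvCell board (sr + s * i) (sc + t * i) == " ") := by
  subst hR; subst hC
  have h := rayHits_reach board s t sr sc N hst hpath hdest fuel 1 le_rfl hN1 (by omega)
  rw [show sr + s * 1 = sr + s by ring, show sc + t * 1 = sc + t by ring] at h
  exact h

-- membership in B's generated pawn move list
theorem pawn_moves_mem (board : List (List String)) (sr sc : Int) (x : Int × Int) :
    (((if pvGetQ board (sr - 1) sc = some " " then
        (sr - 1, sc) :: (if sr = 6 ∧ pvGetQ board 4 sc = some " " then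
          [((4 : Int), sc)] else [])
      else []) ++
      ([(-1 : Int), 1].foldl (fun ms d =>
         match pvGetQ board (sr - 1) (sc + d) with
         | some sq => if sq ≠ " " then ms ++ [(sr - 1, sc + d)] else ms
         | none => ms) [])).contains x) = true ↔
      ((pvGetQ board (sr - 1) sc = some " " ∧ x = (sr - 1, sc)) ∨
       (pvGetQ board (sr - 1) sc = some " " ∧ sr = 6 ∧ pvGetQ board 4 sc = some " " ∧
        x = (4, sc)) ∨
       ((∃ sq, pvGetQ board (sr - 1) (sc + -1) = some sq ∧ sq ≠ " ") ∧ x = (sr - 1, sc + -1)) ∨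
       ((∃ sq, pvGetQ board (sr - 1) (sc + 1) = some sq ∧ sq ≠ " ") ∧ x = (sr - 1, sc + 1))) := by
  rw [List.contains_iff_mem, List.mem_append]
  simp only [List.foldl_cons, List.foldl_nil]
  rcases hm : pvGetQ board (sr - 1) (sc + -1) with _ | s1 <;>
    rcases hp : pvGetQ board (sr - 1) (sc + 1) with _ | s2 <;>
    dsimp only <;> split_ifs <;>
    simp_all [List.mem_append, List.mem_cons, Prod.mk.injEq] <;>
    tauto


-- a ray walk can never return to (or cross) a square off its line: collections of misses
theorem rook_rays_false (board : List (List String)) (sr sc dR dC : Int)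
    (h : ∀ (a b : Int), (a = 1 ∧ b = 0) ∨ (a = -1 ∧ b = 0) ∨ (a = 0 ∧ b = 1) ∨ (a = 0 ∧ b = -1) →
      ∀ i : Int, 0 ≤ i → (sr + a + a * i, sc + b + b * i) ≠ (dR, dC)) :
    pvRookDirs.any (fun d =>
      rayHits board (dR, dC) d.1 d.2 (sr + d.1) (sc + d.2) (pvFuel board)) = false := by
  unfold pvRookDirs
  simp only [List.any_cons, List.any_nil]
  try dsimp only
  rw [rayHits_miss board (dR, dC) 1 0 (sr + 1) (sc + 0)
        (by intro i hi; have := h 1 0 (by tauto) i hi; simpa using this),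
      rayHits_miss board (dR, dC) (-1) 0 (sr + -1) (sc + 0)
        (by intro i hi; have := h (-1) 0 (by tauto) i hi; simpa using this),
      rayHits_miss board (dR, dC) 0 1 (sr + 0) (sc + 1)
        (by intro i hi; have := h 0 1 (by tauto) i hi; simpa using this),
      rayHits_miss board (dR, dC) 0 (-1) (sr + 0) (sc + -1)
        (by intro i hi; have := h 0 (-1) (by tauto) i hi; simpa using this)]
  rfl

theorem bishop_rays_false (board : List (List String)) (sr sc dR dC : Int)
    (h : ∀ (a b : Int), (a = 1 ∨ a = -1) → (b = 1 ∨ b = -1) →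
      ∀ i : Int, 0 ≤ i → (sr + a + a * i, sc + b + b * i) ≠ (dR, dC)) :
    pvBishopDirs.any (fun d =>
      rayHits board (dR, dC) d.1 d.2 (sr + d.1) (sc + d.2) (pvFuel board)) = false := by
  unfold pvBishopDirs
  simp only [List.any_cons, List.any_nil]
  try dsimp only
  rw [rayHits_miss board (dR, dC) 1 1 (sr + 1) (sc + 1)
        (by intro i hi; have := h 1 1 (by tauto) (by tauto) i hi; simpa using this),
      rayHits_miss board (dR, dC) 1 (-1) (sr + 1) (sc + -1)
        (by intro i hi; have := h 1 (-1) (by tauto) (by tauto) i hi; simpa using this),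
      rayHits_miss board (dR, dC) (-1) 1 (sr + -1) (sc + 1)
        (by intro i hi; have := h (-1) 1 (by tauto) (by tauto) i hi; simpa using this),
      rayHits_miss board (dR, dC) (-1) (-1) (sr + -1) (sc + -1)
        (by intro i hi; have := h (-1) (-1) (by tauto) (by tauto) i hi; simpa using this)]
  rfl

-- A's axis-aligned clear-path scan equals B's four rook rays
theorem rook_case (board : List (List String)) (sr sc dR dC : Int)
    (hok1 : pvOk board sr sc = true) (hok2 : pvOk board dR dC = true)
    (hpathok : pvRookPathOk board sr sc dR dC = true)
    (halig : sr = dR ∨ sc = dC) (hns : ¬(sr = dR ∧ sc = dC)) :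
    (if sr = dR then
      (PySem.List.pyRange (sc + (if sc < dC then 1 else -1)) dC (if sc < dC then 1 else -1)).all
        (fun col => pvCell board sr col == " ")
    else
      (PySem.List.pyRange (sr + (if sr < dR then 1 else -1)) dR (if sr < dR then 1 else -1)).all
        (fun row => pvCell board row sc == " "))
    = pvRookDirs.any (fun d =>
        rayHits board (dR, dC) d.1 d.2 (sr + d.1) (sc + d.2) (pvFuel board)) := by
  unfold pvRookPathOk at hpathok
  rcases halig with hrr | hcc
  · have hcc : sc ≠ dC := fun h => hns ⟨hrr, h⟩
    have h0 : dR - sr = 0 := by omega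
    rw [if_pos hrr, range_shift sc dC (fun col => pvCell board sr col == " ")]
    rw [h0, pvSign_zero] at hpathok
    obtain ⟨hrb, row, hrow, hcb1, hcb2, hlen⟩ := pvOk_bounds board sr sc hok1
    obtain ⟨hrb', row', hrow', hcb1', hcb2', hlen'⟩ := pvOk_bounds board dR dC hok2
    have hrw : row = row' := by
      rw [← hrr] at hrow'
      exact Option.some.inj (hrow.symm.trans hrow')
    have hlenEq : row.length = row'.length := by rw [hrw]
    unfold pvRookDirs
    simp only [List.any_cons, List.any_nil]
    try dsimp only
    rw [rayHits_miss board (dR, dC) 1 0 (sr + 1) (sc + 0)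
          (by intro i hi hcon; rw [Prod.mk.injEq] at hcon; omega),
        rayHits_miss board (dR, dC) (-1) 0 (sr + -1) (sc + 0)
          (by intro i hi hcon; rw [Prod.mk.injEq] at hcon; omega)]
    rcases lt_or_gt_of_ne hcc with hlt | hgt
    · rw [rayHits_miss board (dR, dC) 0 (-1) (sr + 0) (sc + -1)
            (by intro i hi hcon; rw [Prod.mk.injEq] at hcon; omega)]
      have hre := rayHits_reach' board 0 1 sr sc dR dC (dC - sc) (pvFuel board)
        (Or.inr (Or.inr (Or.inl rfl))) (by omega) (by omega) (by omega)
        (fun i h1 h2 => by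
          have hm := List.all_eq_true.mp hpathok i (by
            rw [PySem.List.mem_pyRange_one]
            refine ⟨h1, ?_⟩
            rw [abs_zero, max_eq_right (abs_nonneg _),
                abs_of_pos (by omega : (0:Int) < dC - sc)]
            omega)
          rw [pvSign_pos (by omega : (0:Int) < dC - sc)] at hm
          simpa using hm)
        hok2 (by unfold pvFuel; push_cast; omega)
      rw [hre, pvSign_pos (by omega : (0:Int) < dC - sc),
          abs_of_pos (by omega : (0:Int) < dC - sc)]
      simp only [zero_mul, add_zero, Bool.or_false, Bool.false_or]
    · rw [rayHits_miss board (dR, dC) 0 1 (sr + 0) (sc + 1)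
            (by intro i hi hcon; rw [Prod.mk.injEq] at hcon; omega)]
      have hre := rayHits_reach' board 0 (-1) sr sc dR dC (sc - dC) (pvFuel board)
        (Or.inr (Or.inr (Or.inr rfl))) (by omega) (by omega) (by omega)
        (fun i h1 h2 => by
          have hm := List.all_eq_true.mp hpathok i (by
            rw [PySem.List.mem_pyRange_one]
            refine ⟨h1, ?_⟩
            rw [abs_zero, max_eq_right (abs_nonneg _),
                abs_of_neg (by omega : dC - sc < 0)]
            omega)
          rw [pvSign_neg (by omega : dC - sc < 0)] at hm
          simpa using hm)
        hok2 (by unfold pvFuel; push_cast; omega)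
      rw [hre, pvSign_neg (by omega : dC - sc < 0),
          abs_of_neg (by omega : dC - sc < 0)]
      simp only [zero_mul, add_zero, Bool.or_false, Bool.false_or]
      rw [show -(dC - sc) = sc - dC by ring]
  · have hrr : sr ≠ dR := fun h => hns ⟨h, hcc⟩
    have h0 : dC - sc = 0 := by omega
    rw [if_neg hrr, range_shift sr dR (fun row => pvCell board row sc == " ")]
    rw [h0, pvSign_zero] at hpathok
    obtain ⟨⟨hrb1, hrb2⟩, -⟩ := pvOk_bounds board sr sc hok1
    obtain ⟨⟨hrb1', hrb2'⟩, -⟩ := pvOk_bounds board dR dC hok2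
    unfold pvRookDirs
    simp only [List.any_cons, List.any_nil]
    try dsimp only
    rw [rayHits_miss board (dR, dC) 0 1 (sr + 0) (sc + 1)
          (by intro i hi hcon; rw [Prod.mk.injEq] at hcon; omega),
        rayHits_miss board (dR, dC) 0 (-1) (sr + 0) (sc + -1)
          (by intro i hi hcon; rw [Prod.mk.injEq] at hcon; omega)]
    rcases lt_or_gt_of_ne hrr with hlt | hgt
    · rw [rayHits_miss board (dR, dC) (-1) 0 (sr + -1) (sc + 0)
            (by intro i hi hcon; rw [Prod.mk.injEq] at hcon; omega)]
      have hre := rayHits_reach' board 1 0 sr sc dR dC (dR - sr) (pvFuel board)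
        (Or.inl rfl) (by omega) (by omega) (by omega)
        (fun i h1 h2 => by
          have hm := List.all_eq_true.mp hpathok i (by
            rw [PySem.List.mem_pyRange_one]
            refine ⟨h1, ?_⟩
            rw [abs_zero, max_eq_left (abs_nonneg _),
                abs_of_pos (by omega : (0:Int) < dR - sr)]
            omega)
          rw [pvSign_pos (by omega : (0:Int) < dR - sr)] at hm
          simpa using hm)
        hok2 (by unfold pvFuel; push_cast; omega)
      rw [hre, pvSign_pos (by omega : (0:Int) < dR - sr),
          abs_of_pos (by omega : (0:Int) < dR - sr)]
      simp only [zero_mul, add_zero, Bool.or_false, Bool.false_or]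
    · rw [rayHits_miss board (dR, dC) 1 0 (sr + 1) (sc + 0)
            (by intro i hi hcon; rw [Prod.mk.injEq] at hcon; omega)]
      have hre := rayHits_reach' board (-1) 0 sr sc dR dC (sr - dR) (pvFuel board)
        (Or.inr (Or.inl rfl)) (by omega) (by omega) (by omega)
        (fun i h1 h2 => by
          have hm := List.all_eq_true.mp hpathok i (by
            rw [PySem.List.mem_pyRange_one]
            refine ⟨h1, ?_⟩
            rw [abs_zero, max_eq_left (abs_nonneg _),
                abs_of_neg (by omega : dR - sr < 0)]
            omega)
          rw [pvSign_neg (by omega : dR - sr < 0)] at hm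
          simpa using hm)
        hok2 (by unfold pvFuel; push_cast; omega)
      rw [hre, pvSign_neg (by omega : dR - sr < 0),
          abs_of_neg (by omega : dR - sr < 0)]
      simp only [zero_mul, add_zero, Bool.or_false, Bool.false_or]
      rw [show -(dR - sr) = sr - dR by ring]


-- A's diagonal clear-path loop equals B's four bishop rays
theorem diag_case (board : List (List String)) (sr sc dR dC : Int)
    (hok1 : pvOk board sr sc = true) (hok2 : pvOk board dR dC = true)
    (hpathok : pvDiagPathOk board sr sc dR dC = true)
    (habs : |sr - dR| = |sc - dC|) (hsr : sr ≠ dR) :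
    slideA board dR dC (if sr < dR then 1 else -1) (if sc < dC then 1 else -1)
        (sr + (if sr < dR then 1 else -1)) (sc + (if sc < dC then 1 else -1))
        (dR - sr).natAbs
      = pvBishopDirs.any (fun d =>
          rayHits board (dR, dC) d.1 d.2 (sr + d.1) (sc + d.2) (pvFuel board)) := by
  unfold pvDiagPathOk at hpathok
  have hsc : sc ≠ dC := by
    intro h
    rw [h, sub_self, abs_zero, abs_eq_zero] at habs
    omega
  obtain ⟨⟨hrb1, hrb2⟩, -⟩ := pvOk_bounds board sr sc hok1
  obtain ⟨⟨hrb1', hrb2'⟩, -⟩ := pvOk_bounds board dR dC hok2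
  have habsN : (sr - dR).natAbs = (sc - dC).natAbs := by
    rw [Int.abs_eq_natAbs, Int.abs_eq_natAbs] at habs
    exact_mod_cast habs
  rw [slideA_eq_clear board sr sc dR dC habs hsr]
  unfold pvBishopDirs
  simp only [List.any_cons, List.any_nil]
  try dsimp only
  rcases lt_or_gt_of_ne hsr with hvlt | hvgt <;> rcases lt_or_gt_of_ne hsc with hhlt | hhgt
  · rw [rayHits_miss board (dR, dC) 1 (-1) (sr + 1) (sc + -1)
          (by intro i hi hcon; rw [Prod.mk.injEq] at hcon; omega),
        rayHits_miss board (dR, dC) (-1) 1 (sr + -1) (sc + 1)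
          (by intro i hi hcon; rw [Prod.mk.injEq] at hcon; omega),
        rayHits_miss board (dR, dC) (-1) (-1) (sr + -1) (sc + -1)
          (by intro i hi hcon; rw [Prod.mk.injEq] at hcon; omega)]
    have hre := rayHits_reach' board 1 1 sr sc dR dC (dR - sr) (pvFuel board)
      (Or.inl rfl) (by omega) (by omega) (by omega)
      (fun i h1 h2 => by
        have hm := List.all_eq_true.mp hpathok i (by
          rw [PySem.List.mem_pyRange_one]
          exact ⟨h1, by rw [abs_of_pos (by omega : (0:Int) < dR - sr)]; omega⟩)
        rw [pvSign_pos (by omega : (0:Int) < dR - sr),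
            pvSign_pos (by omega : (0:Int) < dC - sc)] at hm
        exact hm)
      hok2 (by unfold pvFuel; push_cast; omega)
    rw [hre, pvSign_pos (by omega : (0:Int) < dR - sr),
        pvSign_pos (by omega : (0:Int) < dC - sc),
        abs_of_pos (by omega : (0:Int) < dR - sr)]
    simp only [Bool.or_false, Bool.false_or]
  · rw [rayHits_miss board (dR, dC) 1 1 (sr + 1) (sc + 1)
          (by intro i hi hcon; rw [Prod.mk.injEq] at hcon; omega),
        rayHits_miss board (dR, dC) (-1) 1 (sr + -1) (sc + 1)
          (by intro i hi hcon; rw [Prod.mk.injEq] at hcon; omega),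
        rayHits_miss board (dR, dC) (-1) (-1) (sr + -1) (sc + -1)
          (by intro i hi hcon; rw [Prod.mk.injEq] at hcon; omega)]
    have hre := rayHits_reach' board 1 (-1) sr sc dR dC (dR - sr) (pvFuel board)
      (Or.inl rfl) (by omega) (by omega) (by omega)
      (fun i h1 h2 => by
        have hm := List.all_eq_true.mp hpathok i (by
          rw [PySem.List.mem_pyRange_one]
          exact ⟨h1, by rw [abs_of_pos (by omega : (0:Int) < dR - sr)]; omega⟩)
        rw [pvSign_pos (by omega : (0:Int) < dR - sr),
            pvSign_neg (by omega : dC - sc < 0)] at hm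
        exact hm)
      hok2 (by unfold pvFuel; push_cast; omega)
    rw [hre, pvSign_pos (by omega : (0:Int) < dR - sr),
        pvSign_neg (by omega : dC - sc < 0),
        abs_of_pos (by omega : (0:Int) < dR - sr)]
    simp only [Bool.or_false, Bool.false_or]
  · rw [rayHits_miss board (dR, dC) 1 1 (sr + 1) (sc + 1)
          (by intro i hi hcon; rw [Prod.mk.injEq] at hcon; omega),
        rayHits_miss board (dR, dC) 1 (-1) (sr + 1) (sc + -1)
          (by intro i hi hcon; rw [Prod.mk.injEq] at hcon; omega),
        rayHits_miss board (dR, dC) (-1) (-1) (sr + -1) (sc + -1)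
          (by intro i hi hcon; rw [Prod.mk.injEq] at hcon; omega)]
    have hre := rayHits_reach' board (-1) 1 sr sc dR dC (sr - dR) (pvFuel board)
      (Or.inr (Or.inl rfl)) (by omega) (by omega) (by omega)
      (fun i h1 h2 => by
        have hm := List.all_eq_true.mp hpathok i (by
          rw [PySem.List.mem_pyRange_one]
          exact ⟨h1, by rw [abs_of_neg (by omega : dR - sr < 0)]; omega⟩)
        rw [pvSign_neg (by omega : dR - sr < 0),
            pvSign_pos (by omega : (0:Int) < dC - sc)] at hm
        exact hm)
      hok2 (by unfold pvFuel; push_cast; omega)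
    rw [hre, pvSign_neg (by omega : dR - sr < 0),
        pvSign_pos (by omega : (0:Int) < dC - sc),
        abs_of_neg (by omega : dR - sr < 0),
        show -(dR - sr) = sr - dR by ring]
    simp only [Bool.or_false, Bool.false_or]
  · rw [rayHits_miss board (dR, dC) 1 1 (sr + 1) (sc + 1)
          (by intro i hi hcon; rw [Prod.mk.injEq] at hcon; omega),
        rayHits_miss board (dR, dC) 1 (-1) (sr + 1) (sc + -1)
          (by intro i hi hcon; rw [Prod.mk.injEq] at hcon; omega),
        rayHits_miss board (dR, dC) (-1) 1 (sr + -1) (sc + 1)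
          (by intro i hi hcon; rw [Prod.mk.injEq] at hcon; omega)]
    have hre := rayHits_reach' board (-1) (-1) sr sc dR dC (sr - dR) (pvFuel board)
      (Or.inr (Or.inl rfl)) (by omega) (by omega) (by omega)
      (fun i h1 h2 => by
        have hm := List.all_eq_true.mp hpathok i (by
          rw [PySem.List.mem_pyRange_one]
          exact ⟨h1, by rw [abs_of_neg (by omega : dR - sr < 0)]; omega⟩)
        rw [pvSign_neg (by omega : dR - sr < 0),
            pvSign_neg (by omega : dC - sc < 0)] at hm
        exact hm)
      hok2 (by unfold pvFuel; push_cast; omega)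
    rw [hre, pvSign_neg (by omega : dR - sr < 0),
        pvSign_neg (by omega : dC - sc < 0),
        abs_of_neg (by omega : dR - sr < 0),
        show -(dR - sr) = sr - dR by ring]
    simp only [Bool.or_false, Bool.false_or]

-- the two ports agree outside D_
set_option maxHeartbeats 1600000 in
theorem pv_main (board : List (List String)) (sr sc dR dC : Int)
    (hpre : Pre_can_piece_move board sr sc dR dC)
    (hD : ¬ D_can_piece_move board sr sc dR dC) :
    can_piece_move board sr sc dR dC = can_piece_move_alt board sr sc dR dC := by
  obtain ⟨hok1, hok2, hself, hpmid, hpath⟩ := hpre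
  have hq2 : pvGetQ board dR dC = some (pvCell board dR dC) := pvGetQ_eq_some board dR dC hok2
  unfold can_piece_move can_piece_move_alt
  by_cases hC : pvCell board dR dC ≠ " " ∧
      ((pvStrIslower (PySem.Str.lower (pvCell board sr sc)) ∧
        pvStrIslower (pvCell board dR dC)) ∨
       (pvStrIsupper (PySem.Str.lower (pvCell board sr sc)) ∧
        pvStrIsupper (pvCell board dR dC)))
  · simp only [if_pos hC]
  · simp only [if_neg hC]
    have hpass : pvPass board sr sc dR dC = true := (pvPass_iff board sr sc dR dC).mpr hC
    by_cases hp : PySem.Str.lower (pvCell board sr sc) = "p"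
    · -- pawn
      simp only [hp, String.reduceEq, reduceIte, or_self, false_or, or_false]
      have hl : pvStrIslower "p" = true := by decide
      have hu : pvStrIsupper "p" = false := by decide
      simp only [hl, hu, reduceIte]
      by_cases hcc : sc = dC
      · rw [if_pos hcc]
        by_cases hdp : pvCell board dR dC = " "
        · have hdp' : ¬ (pvCell board dR dC ≠ " ") := by simp [hdp]
          rw [if_neg hdp']
          by_cases h1 : sr + -1 = dR
          · rw [if_pos h1]
            symm
            rw [pawn_moves_mem]
            left
            refine ⟨?_, by rw [Prod.mk.injEq]; exact ⟨by omega, by omega⟩⟩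
            rw [show sr - 1 = dR by omega, hcc, hq2, hdp]
          · rw [if_neg h1]
            by_cases h6 : sr = 6 ∧ dR = 4
            · obtain ⟨h6a, h6b⟩ := h6
              rw [if_pos (show sr = 6 ∧ True ∧ dR = 4 ∨ sr = 1 ∧ false = true ∧ dR = 3 from
                    Or.inl ⟨h6a, trivial, h6b⟩)]
              have hok5 : pvOk board 5 sc = true :=
                hpmid ⟨hp, by omega, hdp, by omega, h6a, h6b⟩
              have hq5 : pvGetQ board 5 sc = some (pvCell board 5 sc) :=
                pvGetQ_eq_some board 5 sc hok5
              by_cases hmid : pvCell board (sr + -1) sc = " "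
              · rw [if_pos hmid]
                symm
                rw [pawn_moves_mem]
                right; left
                refine ⟨?_, h6a, ?_, by rw [Prod.mk.injEq]; exact ⟨by omega, by omega⟩⟩
                · rw [show sr - 1 = (5:Int) by omega, hq5,
                      show pvCell board 5 sc = " " from by
                        rw [show (5:Int) = sr + -1 by omega]; exact hmid]
                · rw [show (4:Int) = dR by omega, hcc, hq2, hdp]
              · rw [if_neg hmid]
                symm
                rw [Bool.eq_false_iff, Ne, pawn_moves_mem]
                rintro (⟨ha, hb⟩ | ⟨ha, -, -, hb⟩ | ⟨⟨sq, hq, hsq⟩, hb⟩ | ⟨⟨sq, hq, hsq⟩, hb⟩)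
                · rw [Prod.mk.injEq] at hb; omega
                · rw [show sr - 1 = (5:Int) by omega, hq5] at ha
                  apply hmid
                  rw [show sr + -1 = (5:Int) by omega]
                  exact (Option.some.inj ha)
                · rw [Prod.mk.injEq] at hb; omega
                · rw [Prod.mk.injEq] at hb; omega
            · have hdm : ¬ (sr = 6 ∧ True ∧ dR = 4 ∨ sr = 1 ∧ false = true ∧ dR = 3) := by
                rintro (⟨a, -, b⟩ | ⟨-, hff, -⟩)
                · exact h6 ⟨a, b⟩
                · simp at hff
              rw [if_neg hdm]
              symm
              rw [Bool.eq_false_iff, Ne, pawn_moves_mem]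
              rintro (⟨ha, hb⟩ | ⟨ha, h6', hc, hb⟩ | ⟨⟨sq, hq, hsq⟩, hb⟩ | ⟨⟨sq, hq, hsq⟩, hb⟩)
              · rw [Prod.mk.injEq] at hb; omega
              · rw [Prod.mk.injEq] at hb; exact h6 ⟨h6', by omega⟩
              · rw [Prod.mk.injEq] at hb; omega
              · rw [Prod.mk.injEq] at hb; omega
        · rw [if_pos (show pvCell board dR dC ≠ " " from hdp)]
          symm
          rw [Bool.eq_false_iff, Ne, pawn_moves_mem]
          rintro (⟨ha, hb⟩ | ⟨ha, h6', hc, hb⟩ | ⟨⟨sq, hq, hsq⟩, hb⟩ | ⟨⟨sq, hq, hsq⟩, hb⟩)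
          · rw [Prod.mk.injEq] at hb
            apply hdp
            rw [show sr - 1 = dR by omega, hcc, hq2] at ha
            exact Option.some.inj ha
          · rw [Prod.mk.injEq] at hb
            apply hdp
            rw [show (4:Int) = dR by omega, hcc, hq2] at hc
            exact Option.some.inj hc
          · rw [Prod.mk.injEq] at hb; omega
          · rw [Prod.mk.injEq] at hb; omega
      · rw [if_neg hcc]
        by_cases hd : |sc - dC| = 1 ∧ sr + -1 = dR
        · rw [if_pos hd]
          by_cases hdp : pvCell board dR dC = " "
          · rw [show decide (pvCell board dR dC ≠ " ") = false from by simp [hdp]]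
            symm
            rw [Bool.eq_false_iff, Ne, pawn_moves_mem]
            rintro (⟨ha, hb⟩ | ⟨ha, h6', hc, hb⟩ | ⟨⟨sq, hq, hsq⟩, hb⟩ | ⟨⟨sq, hq, hsq⟩, hb⟩)
            · rw [Prod.mk.injEq] at hb; omega
            · rw [Prod.mk.injEq] at hb; omega
            · rw [Prod.mk.injEq] at hb
              apply hsq
              rw [show sr - 1 = dR by omega, show sc + -1 = dC by omega, hq2] at hq
              rw [← Option.some.inj hq]; exact hdp
            · rw [Prod.mk.injEq] at hb
              apply hsq
              rw [show sr - 1 = dR by omega, show sc + 1 = dC by omega, hq2] at hq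
              rw [← Option.some.inj hq]; exact hdp
          · rw [show decide (pvCell board dR dC ≠ " ") = true from by simp [hdp]]
            symm
            rw [pawn_moves_mem]
            rcases (abs_eq (by norm_num : (0:Int) ≤ 1)).mp hd.1 with hpm | hpm
            · right; right; left
              refine ⟨⟨pvCell board dR dC, ?_, by simpa using hdp⟩,
                by rw [Prod.mk.injEq]; exact ⟨by omega, by omega⟩⟩
              rw [show sr - 1 = dR by omega, show sc + -1 = dC by omega, hq2]
            · right; right; right
              refine ⟨⟨pvCell board dR dC, ?_, by simpa using hdp⟩,
                by rw [Prod.mk.injEq]; exact ⟨by omega, by omega⟩⟩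
              rw [show sr - 1 = dR by omega, show sc + 1 = dC by omega, hq2]
        · rw [if_neg hd]
          symm
          rw [Bool.eq_false_iff, Ne, pawn_moves_mem]
          rintro (⟨ha, hb⟩ | ⟨ha, h6', hc, hb⟩ | ⟨⟨sq, hq, hsq⟩, hb⟩ | ⟨⟨sq, hq, hsq⟩, hb⟩)
          · rw [Prod.mk.injEq] at hb; omega
          · rw [Prod.mk.injEq] at hb; omega
          · rw [Prod.mk.injEq] at hb
            exact hd ⟨by rw [show sc - dC = 1 by omega]; norm_num, by omega⟩
          · rw [Prod.mk.injEq] at hb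
            exact hd ⟨by rw [show sc - dC = -1 by omega]; norm_num, by omega⟩
    · by_cases hr : PySem.Str.lower (pvCell board sr sc) = "r"
      · -- rook
        simp only [hr, String.reduceEq, reduceIte, true_or, or_false, false_or]
        have hns : ¬ (sr = dR ∧ sc = dC) := by
          rintro ⟨e1, e2⟩
          apply hD
          refine ⟨e1, e2, ?_⟩
          have hup := pv_self_upper board sr sc dR dC 'r' 'R'
            (fun c hcc => pv_lowerChar_shift c 'R' 'r' (by decide) (by decide) (by decide) hcc)
            (by decide) (by decide) e1 e2 hpass (by rw [hr]; rfl)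
          have hcell : pvCell board sr sc = "R" := String.toList_inj.mp hup
          have hsome : pvGetQ board sr sc = some "R" := by
            rw [pvGetQ_eq_some board sr sc hok1, hcell]
          have hDacc := (pvGetQ_iff_D board sr sc "R" (by decide)).mp hsome
          exact ⟨hDacc.1, hDacc.2.1, by rw [hDacc.2.2]; simp⟩
        by_cases hne : sr ≠ dR ∧ sc ≠ dC
        · rw [if_pos hne]
          symm
          rw [rook_rays_false board sr sc dR dC
                (by rintro a b (⟨rfl, rfl⟩ | ⟨rfl, rfl⟩ | ⟨rfl, rfl⟩ | ⟨rfl, rfl⟩) i hi hcon <;>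
                    (rw [Prod.mk.injEq] at hcon; omega))]
        · rw [if_neg hne]
          have halig : sr = dR ∨ sc = dC := by by_contra hcon; push_neg at hcon; exact hne ⟨hcon.1, hcon.2⟩
          have hrook : pvRookPathOk board sr sc dR dC = true :=
            (hpath hpass).1 (Or.inl hr)
              (by rcases halig with h | h
                  · exact Or.inl (by omega)
                  · exact Or.inr (by omega))
          exact rook_case board sr sc dR dC hok1 hok2 hrook halig hns
      · by_cases hn : PySem.Str.lower (pvCell board sr sc) = "n"
        · -- knight
          simp only [hn, String.reduceEq, reduceIte, or_self, false_or, or_false]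
          rw [Bool.eq_iff_iff, decide_eq_true_iff, List.contains_iff_mem, List.mem_map]
          constructor
          · rintro (⟨h1, h2⟩ | ⟨h1, h2⟩)
            · rcases (abs_eq (by norm_num : (0:Int) ≤ 2)).mp h1 with e1 | e1 <;>
                rcases (abs_eq (by norm_num : (0:Int) ≤ 1)).mp h2 with e2 | e2
              · exact ⟨(-2, -1), by simp, by rw [Prod.mk.injEq]; exact ⟨by omega, by omega⟩⟩
              · exact ⟨(-2, 1), by simp, by rw [Prod.mk.injEq]; exact ⟨by omega, by omega⟩⟩
              · exact ⟨(2, -1), by simp, by rw [Prod.mk.injEq]; exact ⟨by omega, by omega⟩⟩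
              · exact ⟨(2, 1), by simp, by rw [Prod.mk.injEq]; exact ⟨by omega, by omega⟩⟩
            · rcases (abs_eq (by norm_num : (0:Int) ≤ 1)).mp h1 with e1 | e1 <;>
                rcases (abs_eq (by norm_num : (0:Int) ≤ 2)).mp h2 with e2 | e2
              · exact ⟨(-1, -2), by simp, by rw [Prod.mk.injEq]; exact ⟨by omega, by omega⟩⟩
              · exact ⟨(-1, 2), by simp, by rw [Prod.mk.injEq]; exact ⟨by omega, by omega⟩⟩
              · exact ⟨(1, -2), by simp, by rw [Prod.mk.injEq]; exact ⟨by omega, by omega⟩⟩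
              · exact ⟨(1, 2), by simp, by rw [Prod.mk.injEq]; exact ⟨by omega, by omega⟩⟩
          · rintro ⟨d, hdm, heq⟩
            simp only [List.mem_cons, List.not_mem_nil, or_false] at hdm
            rcases hdm with rfl | rfl | rfl | rfl | rfl | rfl | rfl | rfl <;>
              (norm_num [Prod.mk.injEq] at heq
               first
                | exact Or.inl ⟨(abs_eq (by norm_num)).mpr (by omega),
                    (abs_eq (by norm_num)).mpr (by omega)⟩
                | exact Or.inr ⟨(abs_eq (by norm_num)).mpr (by omega),
                    (abs_eq (by norm_num)).mpr (by omega)⟩)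
        · by_cases hbb : PySem.Str.lower (pvCell board sr sc) = "b"
          · -- bishop
            simp only [hbb, String.reduceEq, reduceIte, or_false, false_or, true_or, or_true, or_self]
            by_cases habs : |sr - dR| ≠ |sc - dC|
            · rw [if_pos habs]
              have habsN : (sr - dR).natAbs ≠ (sc - dC).natAbs := by
                intro h; apply habs
                rw [Int.abs_eq_natAbs, Int.abs_eq_natAbs]; exact_mod_cast h
              symm
              rw [bishop_rays_false board sr sc dR dC
                    (by intro a b ha hb i hi hcon; rw [Prod.mk.injEq] at hcon
                        rcases ha with rfl | rfl <;> rcases hb with rfl | rfl <;> omega)]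
            · rw [if_neg habs]
              push_neg at habs
              have hsrne : sr ≠ dR := by
                intro h
                apply hself
                refine ⟨h, ?_, hbb, hpass⟩
                rw [h, sub_self, abs_zero] at habs
                have := abs_eq_zero.mp habs.symm
                omega
              have hscne : sc ≠ dC := by
                intro h
                rw [h, sub_self, abs_zero] at habs
                exact hsrne (by have := abs_eq_zero.mp habs; omega)
              have hdiag : pvDiagPathOk board sr sc dR dC = true :=
                (hpath hpass).2 (Or.inl hbb)
                  ⟨by omega, by omega,
                   by rw [abs_sub_comm dR sr, abs_sub_comm dC sc]; exact habs⟩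
              exact diag_case board sr sc dR dC hok1 hok2 hdiag habs hsrne
          · by_cases hqq : PySem.Str.lower (pvCell board sr sc) = "q"
            · -- queen
              simp only [hqq, String.reduceEq, reduceIte, or_true, false_or, or_false, or_self]
              have hns : ¬ (sr = dR ∧ sc = dC) := by
                rintro ⟨e1, e2⟩
                apply hD
                refine ⟨e1, e2, ?_⟩
                have hup := pv_self_upper board sr sc dR dC 'q' 'Q'
                  (fun c hcc => pv_lowerChar_shift c 'Q' 'q' (by decide) (by decide) (by decide) hcc)
                  (by decide) (by decide) e1 e2 hpass (by rw [hqq]; rfl)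
                have hcell : pvCell board sr sc = "Q" := String.toList_inj.mp hup
                have hsome : pvGetQ board sr sc = some "Q" := by
                  rw [pvGetQ_eq_some board sr sc hok1, hcell]
                have hDacc := (pvGetQ_iff_D board sr sc "Q" (by decide)).mp hsome
                exact ⟨hDacc.1, hDacc.2.1, by rw [hDacc.2.2]; simp⟩
              by_cases halq : sr = dR ∨ sc = dC
              · rw [if_pos halq, List.any_append]
                have hrook : pvRookPathOk board sr sc dR dC = true :=
                  (hpath hpass).1 (Or.inr hqq)
                    (by rcases halq with h | h
                        · exact Or.inl (by omega)
                        · exact Or.inr (by omega))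
                rw [bishop_rays_false board sr sc dR dC
                      (by intro a b ha hb i hi hcon; rw [Prod.mk.injEq] at hcon
                          rcases ha with rfl | rfl <;> rcases hb with rfl | rfl <;>
                            rcases halq with h | h <;> omega),
                    Bool.or_false]
                exact rook_case board sr sc dR dC hok1 hok2 hrook halq hns
              · rw [if_neg halq, List.any_append]
                have hsrne : sr ≠ dR := fun h => halq (Or.inl h)
                have hscne : sc ≠ dC := fun h => halq (Or.inr h)
                rw [rook_rays_false board sr sc dR dC
                      (by rintro a b (⟨rfl, rfl⟩ | ⟨rfl, rfl⟩ | ⟨rfl, rfl⟩ | ⟨rfl, rfl⟩) i hi hcon <;>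
                          (rw [Prod.mk.injEq] at hcon; omega)),
                    Bool.false_or]
                by_cases habs : |sr - dR| = |sc - dC|
                · rw [if_pos habs]
                  have hdiag : pvDiagPathOk board sr sc dR dC = true :=
                    (hpath hpass).2 (Or.inr hqq)
                      ⟨by omega, by omega,
                       by rw [abs_sub_comm dR sr, abs_sub_comm dC sc]; exact habs⟩
                  exact diag_case board sr sc dR dC hok1 hok2 hdiag habs hsrne
                · rw [if_neg habs]
                  have habsN : (sr - dR).natAbs ≠ (sc - dC).natAbs := by
                    intro h; apply habs
                    rw [Int.abs_eq_natAbs, Int.abs_eq_natAbs]; exact_mod_cast h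
                  symm
                  rw [bishop_rays_false board sr sc dR dC
                        (by intro a b ha hb i hi hcon; rw [Prod.mk.injEq] at hcon
                            rcases ha with rfl | rfl <;> rcases hb with rfl | rfl <;> omega)]
            · by_cases hk : PySem.Str.lower (pvCell board sr sc) = "k"
              · -- king
                simp only [hk, String.reduceEq, reduceIte, or_self, false_or, or_false]
                have hns : ¬ (sr = dR ∧ sc = dC) := by
                  rintro ⟨e1, e2⟩
                  apply hD
                  refine ⟨e1, e2, ?_⟩
                  have hup := pv_self_upper board sr sc dR dC 'k' 'K'
                    (fun c hcc => pv_lowerChar_shift c 'K' 'k' (by decide) (by decide) (by decide) hcc)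
                    (by decide) (by decide) e1 e2 hpass (by rw [hk]; rfl)
                  have hcell : pvCell board sr sc = "K" := String.toList_inj.mp hup
                  have hsome : pvGetQ board sr sc = some "K" := by
                    rw [pvGetQ_eq_some board sr sc hok1, hcell]
                  have hDacc := (pvGetQ_iff_D board sr sc "K" (by decide)).mp hsome
                  exact ⟨hDacc.1, hDacc.2.1, by rw [hDacc.2.2]; simp⟩
                rw [Bool.eq_iff_iff, decide_eq_true_iff, List.contains_iff_mem, List.mem_map]
                constructor
                · rintro ⟨h1, h2⟩
                  rw [abs_le] at h1 h2
                  have e1 : dR - sr = -1 ∨ dR - sr = 0 ∨ dR - sr = 1 := by omega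
                  have e2 : dC - sc = -1 ∨ dC - sc = 0 ∨ dC - sc = 1 := by omega
                  rcases e1 with e1 | e1 | e1 <;> rcases e2 with e2 | e2 | e2
                  · exact ⟨(-1, -1), by simp [pvRookDirs, pvBishopDirs],
                      by rw [Prod.mk.injEq]; exact ⟨by omega, by omega⟩⟩
                  · exact ⟨(-1, 0), by simp [pvRookDirs, pvBishopDirs],
                      by rw [Prod.mk.injEq]; exact ⟨by omega, by omega⟩⟩
                  · exact ⟨(-1, 1), by simp [pvRookDirs, pvBishopDirs],
                      by rw [Prod.mk.injEq]; exact ⟨by omega, by omega⟩⟩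
                  · exact ⟨(0, -1), by simp [pvRookDirs, pvBishopDirs],
                      by rw [Prod.mk.injEq]; exact ⟨by omega, by omega⟩⟩
                  · exact absurd ⟨by omega, by omega⟩ hns
                  · exact ⟨(0, 1), by simp [pvRookDirs, pvBishopDirs],
                      by rw [Prod.mk.injEq]; exact ⟨by omega, by omega⟩⟩
                  · exact ⟨(1, -1), by simp [pvRookDirs, pvBishopDirs],
                      by rw [Prod.mk.injEq]; exact ⟨by omega, by omega⟩⟩
                  · exact ⟨(1, 0), by simp [pvRookDirs, pvBishopDirs],
                      by rw [Prod.mk.injEq]; exact ⟨by omega, by omega⟩⟩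
                  · exact ⟨(1, 1), by simp [pvRookDirs, pvBishopDirs],
                      by rw [Prod.mk.injEq]; exact ⟨by omega, by omega⟩⟩
                · rintro ⟨d, hdm, heq⟩
                  simp only [pvRookDirs, pvBishopDirs, List.mem_append, List.mem_cons,
                    List.not_mem_nil, or_false] at hdm
                  rcases hdm with (rfl | rfl | rfl | rfl) | (rfl | rfl | rfl | rfl) <;>
                    (norm_num [Prod.mk.injEq] at heq
                     exact ⟨by rw [abs_le]; omega, by rw [abs_le]; omega⟩)
              · -- no recognised piece
                simp only [hp, hr, hn, hbb, hqq, hk, reduceIte, or_self, false_or, or_false]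

-- ===== VERDICT (by name: the statement is the Claim_ definition above) =====
theorem can_piece_move_spec : Claim_unchanged_can_piece_move := by
  intro board sr sc dR dC _ hpre
  unfold Spec_can_piece_move
  intro hD
  exact pv_main board sr sc dR dC hpre hD

theorem can_piece_move_changed : Claim_changed_can_piece_move := by
  unfold Claim_changed_can_piece_move; decide

theorem can_piece_move_tight : Claim_exact_can_piece_move := by
  intro board sr sc dR dC _ hpre hDD
  obtain ⟨h1, h2, hd1, hd2, hd3⟩ := hDD
  obtain ⟨hok1, hok2, hself, -, -⟩ := hpre
  have hq1 := pvGetQ_eq_some board sr sc hok1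
  simp only [List.mem_cons, List.not_mem_nil, or_false] at hd3
  have hcell : pvCell board sr sc = "R" ∨ pvCell board sr sc = "Q" ∨
      pvCell board sr sc = "K" := by
    rcases hd3 with hcb | hcb | hcb
    · left
      have hb := (pvGetQ_iff_D board sr sc "R" (by decide)).mpr ⟨hd1, hd2, hcb⟩
      rw [hq1] at hb
      exact Option.some.inj hb
    · right; left
      have hb := (pvGetQ_iff_D board sr sc "Q" (by decide)).mpr ⟨hd1, hd2, hcb⟩
      rw [hq1] at hb
      exact Option.some.inj hb
    · right; right
      have hb := (pvGetQ_iff_D board sr sc "K" (by decide)).mpr ⟨hd1, hd2, hcb⟩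
      rw [hq1] at hb
      exact Option.some.inj hb
  have hpass : pvPass board sr sc dR dC = true := by
    unfold pvPass
    rw [← h1, ← h2]
    rcases hcell with hcl | hcl | hcl <;> rw [hcl] <;> decide
  have hC := (pvPass_iff board sr sc dR dC).mp hpass
  unfold can_piece_move can_piece_move_alt
  simp only [if_neg hC]
  rcases hcell with hcl | hcl | hcl
  · -- rook self-move: A returns true (empty scan), B has no ray back to the source
    have hr : PySem.Str.lower (pvCell board sr sc) = "r" := by rw [hcl]; rfl
    simp only [hr, String.reduceEq, reduceIte, true_or, or_false, false_or]
    rw [if_neg (by rintro ⟨a, -⟩; exact a h1), if_pos h1,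
        if_neg (show ¬ sc < dC by omega),
        PySem.List.pyRange_neg_one_eq_nil (by omega : sc + -1 ≤ dC), List.all_nil,
        rook_rays_false board sr sc dR dC
          (by rintro a b (⟨rfl, rfl⟩ | ⟨rfl, rfl⟩ | ⟨rfl, rfl⟩ | ⟨rfl, rfl⟩) i hi hcon <;>
              (rw [Prod.mk.injEq] at hcon; omega))]
    decide
  · -- queen self-move
    have hqq : PySem.Str.lower (pvCell board sr sc) = "q" := by rw [hcl]; rfl
    simp only [hqq, String.reduceEq, reduceIte, or_true, false_or, or_false, or_self]
    rw [if_pos (Or.inl h1), if_pos h1,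
        if_neg (show ¬ sc < dC by omega),
        PySem.List.pyRange_neg_one_eq_nil (by omega : sc + -1 ≤ dC), List.all_nil,
        List.any_append,
        rook_rays_false board sr sc dR dC
          (by rintro a b (⟨rfl, rfl⟩ | ⟨rfl, rfl⟩ | ⟨rfl, rfl⟩ | ⟨rfl, rfl⟩) i hi hcon <;>
              (rw [Prod.mk.injEq] at hcon; omega)),
        bishop_rays_false board sr sc dR dC
          (by intro a b ha hb i hi hcon; rw [Prod.mk.injEq] at hcon
              rcases ha with rfl | rfl <;> rcases hb with rfl | rfl <;> omega)]
    decide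
  · -- king self-move
    have hk : PySem.Str.lower (pvCell board sr sc) = "k" := by rw [hcl]; rfl
    simp only [hk, String.reduceEq, reduceIte, or_self, false_or, or_false]
    have hA : decide (|sr - dR| ≤ 1 ∧ |sc - dC| ≤ 1) = true := by
      rw [h1, h2, sub_self, sub_self, abs_zero]
      decide
    have hB : (((pvRookDirs ++ pvBishopDirs).map
        (fun d => (sr + d.1, sc + d.2))).contains (dR, dC)) = false := by
      rw [Bool.eq_false_iff, Ne, List.contains_iff_mem, List.mem_map]
      rintro ⟨d, hdm, heq⟩
      simp only [pvRookDirs, pvBishopDirs, List.mem_append, List.mem_cons,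
        List.not_mem_nil, or_false] at hdm
      rcases hdm with (rfl | rfl | rfl | rfl) | (rfl | rfl | rfl | rfl) <;>
        (dsimp only at heq; rw [Prod.mk.injEq] at heq; omega)
    rw [hA, hB]
    decide
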